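-- pv_equiv track=rewrite | github.com/doobMM/hibari_tda | tda_pipeline/experiments/run_module_generation_unified.py | replicate_inst2
-- ===== SOURCE A (Python) =====
-- MODULE_LEN = 32
--
-- N_INST2_COPIES = 32
--
-- INST2_INIT_OFFSET = 33
--
-- def replicate_inst2(mod):
--     out = []
--     period = MODULE_LEN + 1
--     for m in range(N_INST2_COPIES):
--         cs = INST2_INIT_OFFSET + m * period
--         for s, p, e in mod:
--             ns = s + cs
--             ne = min(e + cs, cs + MODULE_LEN)
--             if ns < cs + MODULE_LEN and ne > ns:
--                 out.append((ns, p, ne))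
--     return out
-- ===== SOURCE B (Python) =====
-- MODULE_LEN = 32
--
-- N_INST2_COPIES = 32
--
-- INST2_INIT_OFFSET = 33
--
-- def replicate_inst2(mod):
--     # Binary doubling: build the first copy (filter + clamp + shift by 33) once,
--     # then double the whole block 5 times (1 -> 2 -> 4 -> 8 -> 16 -> 32 copies),
--     # each doubling appending the block shifted by the current span.
--     period = MODULE_LEN + 1
--     block = [(s + INST2_INIT_OFFSET, p, min(e, MODULE_LEN) + INST2_INIT_OFFSET)
--              for s, p, e in mod
--              if s < MODULE_LEN and min(e, MODULE_LEN) > s]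
--     span = period
--     for _ in range(5):
--         block = block + [(s + span, p, e + span) for s, p, e in block]
--         span *= 2
--     return block
-- ===== Notes on version B (the rewrite author's own statement) =====
-- stated objective: alternative
-- what changed: B builds the first filtered/clamped/shifted copy once and then produces the 32 copies by binary doubling (five passes, each appending a shifted image of the whole block), instead of A's 32 independent filter-clamp-append passes over the input.
import Mathlib
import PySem

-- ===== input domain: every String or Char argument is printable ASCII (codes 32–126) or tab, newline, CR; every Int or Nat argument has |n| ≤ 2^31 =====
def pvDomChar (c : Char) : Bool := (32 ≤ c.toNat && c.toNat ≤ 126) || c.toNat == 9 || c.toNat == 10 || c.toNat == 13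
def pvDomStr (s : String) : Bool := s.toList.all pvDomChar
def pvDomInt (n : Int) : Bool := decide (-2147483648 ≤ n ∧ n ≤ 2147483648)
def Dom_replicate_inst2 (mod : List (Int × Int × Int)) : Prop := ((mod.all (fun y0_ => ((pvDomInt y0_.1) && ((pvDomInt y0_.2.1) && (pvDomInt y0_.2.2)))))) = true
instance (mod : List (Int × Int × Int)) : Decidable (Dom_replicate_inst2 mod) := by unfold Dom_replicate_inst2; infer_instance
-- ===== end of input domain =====

-- B replaces A's 32 filter-and-append passes by binary doubling: build the first
-- filtered/clamped/shifted copy once, then double the whole block 5 times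
-- (1 -> 2 -> 4 -> 8 -> 16 -> 32 copies), appending a shifted image of the block
-- at each doubling (objective: alternative algorithm, O(log copies) passes).

-- ===== PORT A =====
-- for m in range(32): cs = 33 + m*33; for (s,p,e) in mod: clamp, test, append
def replicate_inst2 (mod : List (Int × Int × Int)) : List (Int × Int × Int) :=
  (PySem.List.pyRange 0 32 1).foldl (fun out m =>
    let cs : Int := 33 + m * (32 + 1)
    mod.foldl (fun out t =>
      let ns := t.1 + cs
      let ne := min (t.2.2 + cs) (cs + 32)
      if ns < cs + 32 ∧ ne > ns then out ++ [(ns, t.2.1, ne)] else out) out) []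

-- ===== PORT B =====
-- first copy built once (filter + clamp + shift by 33), then 5 doubling steps;
-- state of the loop is (block, span), one step: block := block ++ shift(block, span); span := span*2
def replicate_inst2_alt (mod : List (Int × Int × Int)) : List (Int × Int × Int) :=
  let block0 := mod.filterMap (fun t =>
    if t.1 < 32 ∧ min t.2.2 32 > t.1
    then some (t.1 + 33, t.2.1, min t.2.2 32 + 33) else none)
  let r := (PySem.List.pyRange 0 5 1).foldl
    (fun st _ => (st.1 ++ st.1.map (fun b => (b.1 + st.2, b.2.1, b.2.2 + st.2)), st.2 * 2))
    (block0, (33 : Int))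
  r.1

-- ===== PRECONDITION & SPEC =====
def Spec_replicate_inst2 (mod : List (Int × Int × Int)) (out : List (Int × Int × Int)) : Prop := out = replicate_inst2_alt mod
instance (mod : List (Int × Int × Int)) (out : List (Int × Int × Int)) : Decidable (Spec_replicate_inst2 mod out) := by unfold Spec_replicate_inst2; infer_instance

-- ===== CLAIM (what is proved, stated in full; the proofs are below) =====
def Claim_equal_replicate_inst2 : Prop := ∀ (mod : List (Int × Int × Int)), Dom_replicate_inst2 mod → Spec_replicate_inst2 mod (replicate_inst2 mod)

-- ===== LEMMAS AND PROOFS =====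

-- shift a whole block by c
def shiftL (c : Int) (L : List (Int × Int × Int)) : List (Int × Int × Int) :=
  L.map (fun b => (b.1 + c, b.2.1, b.2.2 + c))

-- the filtered/clamped (unshifted) base list
def baseOf (mod : List (Int × Int × Int)) : List (Int × Int × Int) :=
  mod.filterMap (fun t =>
    if t.1 < 32 ∧ min t.2.2 32 > t.1 then some (t.1, t.2.1, min t.2.2 32) else none)

-- copies 0..n-1, copy m shifted by 33*(m+1)
def copies (mod : List (Int × Int × Int)) (n : Nat) : List (Int × Int × Int) :=
  (List.range n).flatMap (fun (m : Nat) => shiftL (33 * ((m : Int) + 1)) (baseOf mod))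

theorem shift_min (e cs : Int) : min (e + cs) (cs + 32) = min e 32 + cs := by
  rw [min_def, min_def]; split_ifs <;> omega

theorem shiftL_shiftL (a b : Int) (L : List (Int × Int × Int)) :
    shiftL a (shiftL b L) = shiftL (b + a) L := by
  simp only [shiftL, List.map_map]
  refine List.map_congr_left (fun t _ => ?_)
  simp only [Function.comp]
  refine Prod.ext ?_ (Prod.ext rfl ?_) <;> simp <;> ring

-- one doubling step: n copies plus the same block shifted by 33*n gives 2*n copies
theorem copies_double (mod : List (Int × Int × Int)) (n : Nat) :
    copies mod n ++ shiftL (33 * (n : Int)) (copies mod n) = copies mod (2 * n) := by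
  have hr : (2 * n) = n + n := by ring
  rw [hr]
  conv_rhs => rw [copies, List.range_add, List.flatMap_append]
  congr 1
  rw [copies, shiftL, List.map_flatMap, List.flatMap_map]
  refine List.flatMap_congr (fun m _ => ?_)
  have h := shiftL_shiftL (33 * (n : Int)) (33 * ((m : Int) + 1)) (baseOf mod)
  simp only [shiftL] at h ⊢
  rw [h]
  have harith : 33 * ((m : Int) + 1) + 33 * (n : Int) = 33 * (((n + m : Nat) : Int) + 1) := by
    push_cast; ring
  rw [harith]

-- A's inner pass appends the base shifted by cs, for cs = 33 + m*33 (any m)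
theorem inner_shift (mod : List (Int × Int × Int)) (cs : Int) (acc : List (Int × Int × Int)) :
    mod.foldl (fun out t =>
      let ns := t.1 + cs
      let ne := min (t.2.2 + cs) (cs + 32)
      if ns < cs + 32 ∧ ne > ns then out ++ [(ns, t.2.1, ne)] else out) acc
    = acc ++ shiftL cs (baseOf mod) := by
  induction mod generalizing acc with
  | nil => simp [baseOf, shiftL]
  | cons t rest ih =>
    simp only [List.foldl_cons, baseOf, List.filterMap_cons]
    have hcond : (t.1 + cs < cs + 32 ∧ min (t.2.2 + cs) (cs + 32) > t.1 + cs) ↔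
        (t.1 < 32 ∧ min t.2.2 32 > t.1) := by
      rw [shift_min]; generalize min t.2.2 32 = M; omega
    by_cases h : t.1 < 32 ∧ min t.2.2 32 > t.1
    · rw [if_pos (hcond.mpr h), if_pos h]
      rw [ih]
      simp [baseOf, shiftL, shift_min, List.append_assoc]
    · rw [if_neg (fun hh => h (hcond.mp hh)), if_neg h]
      rw [ih]; rfl

-- A computes copies 0..31
theorem A_eq_copies (mod : List (Int × Int × Int)) :
    replicate_inst2 mod = copies mod 32 := by
  unfold replicate_inst2
  have hfold : ∀ (R : List Int) (acc : List (Int × Int × Int)),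
      R.foldl (fun out m =>
        let cs : Int := 33 + m * (32 + 1)
        mod.foldl (fun out t =>
          let ns := t.1 + cs
          let ne := min (t.2.2 + cs) (cs + 32)
          if ns < cs + 32 ∧ ne > ns then out ++ [(ns, t.2.1, ne)] else out) out) acc
      = acc ++ R.flatMap (fun m => shiftL (33 + m * (32 + 1)) (baseOf mod)) := by
    intro R
    induction R with
    | nil => intro acc; simp
    | cons m rest ih =>
      intro acc
      simp only [List.foldl_cons, List.flatMap_cons]
      rw [inner_shift, ih, List.append_assoc]
  rw [hfold]
  have hR : PySem.List.pyRange 0 32 1 = (List.range 32).map (fun k => ((k : Nat) : Int)) := by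
    decide
  rw [hR, List.flatMap_map, List.nil_append, copies]
  refine List.flatMap_congr (fun m _ => ?_)
  have : (33 : Int) + (m : Int) * (32 + 1) = 33 * ((m : Int) + 1) := by ring
  rw [this]

-- B computes copies 0..31 by five doublings
theorem B_eq_copies (mod : List (Int × Int × Int)) :
    replicate_inst2_alt mod = copies mod 32 := by
  unfold replicate_inst2_alt
  have hR : PySem.List.pyRange 0 5 1 = [0, 1, 2, 3, 4] := by decide
  have hblock : mod.filterMap (fun t =>
      if t.1 < 32 ∧ min t.2.2 32 > t.1
      then some (t.1 + 33, t.2.1, min t.2.2 32 + 33) else none) = copies mod 1 := by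
    simp only [copies, List.range_one, List.flatMap_cons, List.flatMap_nil, List.append_nil,
      shiftL, baseOf]
    norm_num
    rw [List.map_filterMap]
    refine List.filterMap_congr (fun t _ => ?_)
    split_ifs <;> rfl
  have hstep : ∀ (n : Nat),
      copies mod n ++ (copies mod n).map
        (fun b => (b.1 + 33 * (n : Int), b.2.1, b.2.2 + 33 * (n : Int))) = copies mod (2 * n) := by
    intro n; exact copies_double mod n
  simp only [hR, List.foldl_cons, List.foldl_nil, hblock]
  have h1 := hstep 1
  have h2 := hstep 2
  have h4 := hstep 4
  have h8 := hstep 8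
  have h16 := hstep 16
  norm_num at h1 h2 h4 h8 h16
  have e16 : (33 : Int) * 2 * 2 * 2 * 2 = 528 := by norm_num
  have e8 : (33 : Int) * 2 * 2 * 2 = 264 := by norm_num
  have e4 : (33 : Int) * 2 * 2 = 132 := by norm_num
  have e2 : (33 : Int) * 2 = 66 := by norm_num
  rw [e16, e8, e4, e2, h1, h2, h4, h8, h16]

-- ===== VERDICT (by name: the statement is the Claim_ definition above) =====
theorem replicate_inst2_spec : Claim_equal_replicate_inst2 := by
  intro mod _
  unfold Spec_replicate_inst2
  rw [A_eq_copies, B_eq_copies]
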